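-- pv_equiv track=rewrite | github.com/Menme0502/First_pub | maze_runner.py | maze_to_chars
-- ===== SOURCE A (Python) =====
-- from typing import List, Tuple, Optional, Iterable, Dict
--
-- def maze_to_chars(grid: List[List[int]]) -> List[List[str]]:
--     """セルベースの迷路を文字グリッド(壁=#, 通路=空白)に変換。"""
--     h = len(grid)
--     w = len(grid[0]) if h else 0
--     H, W = 2 * h + 1, 2 * w + 1
--     chars = [["#" for _ in range(W)] for _ in range(H)]
--
--     # 開口部: 左上を入口、右下を出口
--     chars[1][0] = " "
--     chars[H - 2][W - 1] = " "
--
--     # セル中心を空白にし、通路に応じて壁を壊す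
--     for y in range(h):
--         for x in range(w):
--             cx, cy = 2 * x + 1, 2 * y + 1
--             chars[cy][cx] = " "
--             val = grid[y][x]
--             if val & 1:  # N
--                 chars[cy - 1][cx] = " "
--             if val & 2:  # E
--                 chars[cy][cx + 1] = " "
--             if val & 4:  # S
--                 chars[cy + 1][cx] = " "
--             if val & 8:  # W
--                 chars[cy][cx - 1] = " "
--     return chars
-- ===== SOURCE B (Python) =====
-- from typing import List
--
-- def maze_to_chars(grid: List[List[int]]) -> List[List[str]]:
--     """Position-based rendering: classify each output coordinate directly."""
--     h = len(grid)
--     w = len(grid[0]) if h else 0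
--     H, W = 2 * h + 1, 2 * w + 1
--
--     def ch(r: int, c: int) -> str:
--         if r % 2 == 1 and c % 2 == 1:
--             return " "                      # cell center
--         if r % 2 == 1:                      # vertical wall between cells (r//2, c//2-1) and (r//2, c//2)
--             y, x = r // 2, c // 2
--             left = x >= 1 and grid[y][x - 1] & 2
--             right = x < w and grid[y][x] & 8
--             return " " if (left or right) else "#"
--         if c % 2 == 1:                      # horizontal wall between cells (r//2-1, c//2) and (r//2, c//2)
--             y, x = r // 2, c // 2
--             up = y >= 1 and grid[y - 1][x] & 4
--             down = y < h and grid[y][x] & 1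
--             return " " if (up or down) else "#"
--         return "#"                          # pillar
--
--     chars = [[ch(r, c) for c in range(W)] for r in range(H)]
--     chars[1][0] = " "
--     chars[H - 2][W - 1] = " "
--     return chars
-- ===== Notes on version B (the rewrite author's own statement) =====
-- stated objective: alternative
-- what changed: A mutates a wall-filled grid, looping over maze cells and knocking out walls per direction bit; B builds the grid in one pass by classifying every output coordinate (pillar/center/vertical/horizontal wall) from the one or two adjacent cells' bits.
import Mathlib
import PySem

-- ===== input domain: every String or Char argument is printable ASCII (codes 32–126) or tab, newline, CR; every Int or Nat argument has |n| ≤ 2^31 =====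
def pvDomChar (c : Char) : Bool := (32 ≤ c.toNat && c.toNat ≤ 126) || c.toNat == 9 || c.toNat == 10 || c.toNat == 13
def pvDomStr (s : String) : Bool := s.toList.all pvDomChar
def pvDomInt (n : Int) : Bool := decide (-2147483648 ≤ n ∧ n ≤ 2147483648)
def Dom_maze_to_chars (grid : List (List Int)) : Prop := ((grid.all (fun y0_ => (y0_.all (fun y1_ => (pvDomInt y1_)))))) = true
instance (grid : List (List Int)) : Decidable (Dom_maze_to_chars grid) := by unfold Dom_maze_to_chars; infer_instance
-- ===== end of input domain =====

-- B replaces A's mutate-and-knock-out-walls loop over maze cells by a single pass that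
-- classifies every output coordinate from the adjacent cells' direction bits (objective: alternative).

-- shared helper: the Python assignment chars[r][c] = " " (identity out of range; in range under Pre_)
def pvSet2 (m : List (List String)) (r c : Nat) : List (List String) :=
  m.set r ((m.getD r []).set c " ")

-- ===== PORT A =====
-- one maze cell's writes: center blank, then break N/E/S/W walls per bit
def pvStepA (grid : List (List Int)) (m : List (List String)) (y x : Nat) : List (List String) :=
  let cx := 2 * x + 1
  let cy := 2 * y + 1
  let m1 := pvSet2 m cy cx
  let v := (grid.getD y []).getD x 0
  let m2 := if PySem.Int.band v 1 ≠ 0 then pvSet2 m1 (cy - 1) cx else m1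
  let m3 := if PySem.Int.band v 2 ≠ 0 then pvSet2 m2 cy (cx + 1) else m2
  let m4 := if PySem.Int.band v 4 ≠ 0 then pvSet2 m3 (cy + 1) cx else m3
  let m5 := if PySem.Int.band v 8 ≠ 0 then pvSet2 m4 cy (cx - 1) else m4
  m5

def maze_to_chars (grid : List (List Int)) : List (List String) :=
  let h := grid.length
  let w := if h = 0 then 0 else (grid.headD []).length
  let H := 2 * h + 1
  let W := 2 * w + 1
  let chars := (List.range H).map (fun _ => (List.range W).map (fun _ => "#"))
  let chars := pvSet2 chars 1 0
  let chars := pvSet2 chars (H - 2) (W - 1)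
  (List.range h).foldl (fun m y => (List.range w).foldl (fun m x => pvStepA grid m y x) m) chars

-- ===== PORT B =====
-- classify one output coordinate: center / vertical wall / horizontal wall / pillar
def pvChB (grid : List (List Int)) (h w : Nat) (r c : Nat) : String :=
  if r % 2 = 1 ∧ c % 2 = 1 then " "
  else if r % 2 = 1 then
    if (1 ≤ c / 2 ∧ PySem.Int.band ((grid.getD (r / 2) []).getD (c / 2 - 1) 0) 2 ≠ 0) ∨
       (c / 2 < w ∧ PySem.Int.band ((grid.getD (r / 2) []).getD (c / 2) 0) 8 ≠ 0) then " " else "#"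
  else if c % 2 = 1 then
    if (1 ≤ r / 2 ∧ PySem.Int.band ((grid.getD (r / 2 - 1) []).getD (c / 2) 0) 4 ≠ 0) ∨
       (r / 2 < h ∧ PySem.Int.band ((grid.getD (r / 2) []).getD (c / 2) 0) 1 ≠ 0) then " " else "#"
  else "#"

def maze_to_chars_alt (grid : List (List Int)) : List (List String) :=
  let h := grid.length
  let w := if h = 0 then 0 else (grid.headD []).length
  let H := 2 * h + 1
  let W := 2 * w + 1
  let chars := (List.range H).map (fun r => (List.range W).map (fun c => pvChB grid h w r c))
  let chars := pvSet2 chars 1 0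
  let chars := pvSet2 chars (H - 2) (W - 1)
  chars

-- ===== PRECONDITION & SPEC =====
-- Pre_ excludes exactly the inputs where Python A raises IndexError: the empty grid
-- (chars[1] does not exist) and ragged grids with a row shorter than the first row
-- (grid[y][x] out of range); B raises there too.
def Pre_maze_to_chars (grid : List (List Int)) : Prop :=
  grid ≠ [] ∧ ∀ row ∈ grid, (grid.headD []).length ≤ row.length
instance (grid : List (List Int)) : Decidable (Pre_maze_to_chars grid) := by
  unfold Pre_maze_to_chars; infer_instance

def pvWitness_maze_to_chars : List (List Int) := [[2, 8], [1, 4]]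

def Spec_maze_to_chars (grid : List (List Int)) (out : List (List String)) : Prop := out = maze_to_chars_alt grid
instance (grid : List (List Int)) (out : List (List String)) : Decidable (Spec_maze_to_chars grid out) := by unfold Spec_maze_to_chars; infer_instance

-- ===== CLAIM (what is proved, stated in full; the proofs are below) =====
def Claim_equal_maze_to_chars : Prop := ∀ (grid : List (List Int)), Dom_maze_to_chars grid → Pre_maze_to_chars grid → Spec_maze_to_chars grid (maze_to_chars grid)

-- ===== LEMMAS AND PROOFS =====

-- read entry (r,c), default "#"
def pvGet2 (m : List (List String)) (r c : Nat) : String :=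
  ((m[r]?.getD []))[c]?.getD "#"

-- the coordinates cell (y,x) blanks in A's loop body (abbrev: Decidable by unfolding)
abbrev pvWrites (grid : List (List Int)) (y x r c : Nat) : Prop :=
  (r = 2 * y + 1 ∧ c = 2 * x + 1) ∨
  (PySem.Int.band ((grid.getD y []).getD x 0) 1 ≠ 0 ∧ r = 2 * y ∧ c = 2 * x + 1) ∨
  (PySem.Int.band ((grid.getD y []).getD x 0) 2 ≠ 0 ∧ r = 2 * y + 1 ∧ c = 2 * x + 1 + 1) ∨
  (PySem.Int.band ((grid.getD y []).getD x 0) 4 ≠ 0 ∧ r = 2 * y + 1 + 1 ∧ c = 2 * x + 1) ∨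
  (PySem.Int.band ((grid.getD y []).getD x 0) 8 ≠ 0 ∧ r = 2 * y + 1 ∧ c = 2 * x)

-- shape invariant: (2h+1) rows of length (2w+1)
def pvSh (h w : Nat) (m : List (List String)) : Prop :=
  m.length = 2 * h + 1 ∧ ∀ r < 2 * h + 1, (m[r]?.getD []).length = 2 * w + 1

theorem pvSh_set2 {h w : Nat} {m : List (List String)} (hm : pvSh h w m) (r c : Nat) :
    pvSh h w (pvSet2 m r c) := by
  obtain ⟨h1, h2⟩ := hm
  refine ⟨by simp [pvSet2, h1], fun r' hr' => ?_⟩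
  simp only [pvSet2, List.getElem?_set]
  by_cases he : r = r'
  · subst he
    have hlt : r < m.length := by omega
    rw [if_pos rfl, if_pos hlt, Option.getD_some, List.length_set,
        List.getD_eq_getElem?_getD]
    exact h2 r hr'
  · rw [if_neg he]
    exact h2 r' hr'

theorem pvGet2_set2 {h w : Nat} {m : List (List String)} (hm : pvSh h w m) {r0 c0 : Nat}
    (hr0 : r0 < 2 * h + 1) (hc0 : c0 < 2 * w + 1) (r c : Nat) :
    pvGet2 (pvSet2 m r0 c0) r c = if r = r0 ∧ c = c0 then " " else pvGet2 m r c := by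
  have hr : r0 < m.length := by have := hm.1; omega
  have hc : c0 < (m.getD r0 []).length := by
    rw [List.getD_eq_getElem?_getD, hm.2 r0 hr0]; exact hc0
  simp only [pvGet2, pvSet2, List.getElem?_set]
  by_cases he : r0 = r
  · subst he
    rw [if_pos rfl, if_pos hr, Option.getD_some, List.getElem?_set]
    by_cases hce : c0 = c
    · subst hce
      rw [if_pos rfl, if_pos hc, Option.getD_some, if_pos ⟨rfl, rfl⟩]
    · rw [if_neg hce, if_neg (fun hand => hce hand.2.symm), List.getD_eq_getElem?_getD]
  · rw [if_neg he, if_neg (fun hand => he hand.1.symm)]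

theorem pvGet2_ite_set2 {h w : Nat} {m : List (List String)} (hm : pvSh h w m)
    (b : Prop) [Decidable b] {r0 c0 : Nat}
    (hr0 : r0 < 2 * h + 1) (hc0 : c0 < 2 * w + 1) (r c : Nat) :
    pvGet2 (if b then pvSet2 m r0 c0 else m) r c
      = if b ∧ r = r0 ∧ c = c0 then " " else pvGet2 m r c := by
  by_cases hb : b
  · rw [if_pos hb, pvGet2_set2 hm hr0 hc0]
    by_cases hrc : r = r0 ∧ c = c0
    · rw [if_pos hrc, if_pos ⟨hb, hrc⟩]
    · rw [if_neg hrc, if_neg (fun hx => hrc hx.2)]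
  · rw [if_neg hb, if_neg (fun hx => hb hx.1)]

theorem pvSh_ite_set2 {h w : Nat} {m : List (List String)} (hm : pvSh h w m)
    (b : Prop) [Decidable b] (r0 c0 : Nat) :
    pvSh h w (if b then pvSet2 m r0 c0 else m) := by
  split_ifs with hb
  · exact pvSh_set2 hm r0 c0
  · exact hm

theorem pvSh_stepA {h w : Nat} (grid : List (List Int)) {m : List (List String)}
    (hm : pvSh h w m) (y x : Nat) : pvSh h w (pvStepA grid m y x) := by
  simp only [pvStepA]
  apply pvSh_ite_set2; apply pvSh_ite_set2; apply pvSh_ite_set2; apply pvSh_ite_set2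
  exact pvSh_set2 hm _ _

theorem pvIte_blank (P Q : Prop) [Decidable P] [Decidable Q] (g : String) :
    (if P then " " else if Q then " " else g) = if Q ∨ P then " " else g := by
  by_cases hP : P <;> by_cases hQ : Q <;> simp [hP, hQ]

theorem pvGet2_stepA {h w : Nat} (grid : List (List Int)) {m : List (List String)}
    (hm : pvSh h w m) {y x : Nat} (hy : y < h) (hx : x < w) (r c : Nat) :
    pvGet2 (pvStepA grid m y x) r c =
      if pvWrites grid y x r c then " " else pvGet2 m r c := by
  simp only [pvStepA, Nat.add_sub_cancel]
  set v := (grid.getD y []).getD x 0 with hv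
  set m1 := pvSet2 m (2 * y + 1) (2 * x + 1) with hm1
  have s1 : pvSh h w m1 := pvSh_set2 hm _ _
  set m2 := if PySem.Int.band v 1 ≠ 0 then pvSet2 m1 (2 * y) (2 * x + 1) else m1 with hm2
  have s2 : pvSh h w m2 := by rw [hm2]; exact pvSh_ite_set2 s1 _ _ _
  set m3 := if PySem.Int.band v 2 ≠ 0 then pvSet2 m2 (2 * y + 1) (2 * x + 1 + 1) else m2 with hm3
  have s3 : pvSh h w m3 := by rw [hm3]; exact pvSh_ite_set2 s2 _ _ _
  set m4 := if PySem.Int.band v 4 ≠ 0 then pvSet2 m3 (2 * y + 1 + 1) (2 * x + 1) else m3 with hm4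
  have s4 : pvSh h w m4 := by rw [hm4]; exact pvSh_ite_set2 s3 _ _ _
  rw [pvGet2_ite_set2 s4 _ (by omega) (by omega)]
  rw [hm4, pvGet2_ite_set2 s3 _ (by omega) (by omega)]
  rw [hm3, pvGet2_ite_set2 s2 _ (by omega) (by omega)]
  rw [hm2, pvGet2_ite_set2 s1 _ (by omega) (by omega)]
  rw [hm1, pvGet2_set2 hm (by omega) (by omega)]
  rw [pvIte_blank, pvIte_blank, pvIte_blank, pvIte_blank]

theorem pvInner {h w : Nat} (grid : List (List Int)) {y : Nat} (hy : y < h) :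
    ∀ (L : List Nat), (∀ x ∈ L, x < w) → ∀ (m : List (List String)), pvSh h w m →
      pvSh h w (L.foldl (fun m x => pvStepA grid m y x) m) ∧
      ∀ r c, pvGet2 (L.foldl (fun m x => pvStepA grid m y x) m) r c =
        if ∃ x ∈ L, pvWrites grid y x r c then " " else pvGet2 m r c := by
  intro L
  induction L with
  | nil => exact fun _ m hm => ⟨hm, fun r c => by simp⟩
  | cons a L ih =>
    intro hL m hm
    have ha : a < w := hL a (by simp)
    have hstep : pvSh h w (pvStepA grid m y a) := pvSh_stepA grid hm y a
    obtain ⟨ihSh, ihG⟩ := ih (fun x hx => hL x (by simp [hx])) (pvStepA grid m y a) hstep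
    constructor
    · rw [List.foldl_cons]; exact ihSh
    · intro r c
      rw [List.foldl_cons, ihG r c, pvGet2_stepA grid hm hy ha r c, pvIte_blank]
      simp only [List.exists_mem_cons_iff]

theorem pvOuter {h w : Nat} (grid : List (List Int)) :
    ∀ (L : List Nat), (∀ y ∈ L, y < h) → ∀ (m : List (List String)), pvSh h w m →
      pvSh h w (L.foldl (fun m y => (List.range w).foldl (fun m x => pvStepA grid m y x) m) m) ∧
      ∀ r c, pvGet2 (L.foldl (fun m y => (List.range w).foldl (fun m x => pvStepA grid m y x) m) m) r c =
        if ∃ y ∈ L, ∃ x ∈ List.range w, pvWrites grid y x r c then " " else pvGet2 m r c := by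
  intro L
  induction L with
  | nil => exact fun _ m hm => ⟨hm, fun r c => by simp⟩
  | cons a L ih =>
    intro hL m hm
    have ha : a < h := hL a (by simp)
    obtain ⟨innSh, innG⟩ := pvInner grid ha (List.range w) (by simp) m hm
    obtain ⟨ihSh, ihG⟩ := ih (fun y hy => hL y (by simp [hy])) _ innSh
    constructor
    · rw [List.foldl_cons]; exact ihSh
    · intro r c
      rw [List.foldl_cons, ihG r c, innG r c, pvIte_blank]
      simp only [List.exists_mem_cons_iff]

-- the crux: A's "some cell blanks (r,c)" condition equals B's position classification
theorem pvKey (grid : List (List Int)) (h w r c : Nat) (hr : r < 2 * h + 1) (hc : c < 2 * w + 1) :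
    pvChB grid h w r c =
      if ∃ y ∈ List.range h, ∃ x ∈ List.range w, pvWrites grid y x r c then " " else "#" := by
  simp only [List.mem_range]
  simp only [pvChB]
  by_cases hcen : r % 2 = 1 ∧ c % 2 = 1
  · rw [if_pos hcen]
    refine (if_pos ?_).symm
    exact ⟨r / 2, by omega, c / 2, by omega, Or.inl ⟨by omega, by omega⟩⟩
  · rw [if_neg hcen]
    by_cases hodd : r % 2 = 1
    · rw [if_pos hodd]
      by_cases hvq : (1 ≤ c / 2 ∧ PySem.Int.band ((grid.getD (r / 2) []).getD (c / 2 - 1) 0) 2 ≠ 0) ∨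
          (c / 2 < w ∧ PySem.Int.band ((grid.getD (r / 2) []).getD (c / 2) 0) 8 ≠ 0)
      · rw [if_pos hvq]
        refine (if_pos ?_).symm
        rcases hvq with ⟨hx1, hb⟩ | ⟨hxw, hb⟩
        · refine ⟨r / 2, by omega, c / 2 - 1, by omega, ?_⟩
          exact Or.inr (Or.inr (Or.inl ⟨hb, by omega, by omega⟩))
        · refine ⟨r / 2, by omega, c / 2, by omega, ?_⟩
          exact Or.inr (Or.inr (Or.inr (Or.inr ⟨hb, by omega, by omega⟩)))
      · rw [if_neg hvq]
        refine (if_neg ?_).symm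
        rintro ⟨y, hy, x, hx, W⟩
        rcases W with ⟨h1, h2⟩ | ⟨hb, h1, h2⟩ | ⟨hb, h1, h2⟩ | ⟨hb, h1, h2⟩ | ⟨hb, h1, h2⟩
        · omega
        · omega
        · refine hvq (Or.inl ⟨by omega, ?_⟩)
          have ey : r / 2 = y := by omega
          have ex : c / 2 - 1 = x := by omega
          rw [ey, ex]; exact hb
        · omega
        · refine hvq (Or.inr ⟨by omega, ?_⟩)
          have ey : r / 2 = y := by omega
          have ex : c / 2 = x := by omega
          rw [ey, ex]; exact hb
    · rw [if_neg hodd]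
      by_cases hcodd : c % 2 = 1
      · rw [if_pos hcodd]
        by_cases hhq : (1 ≤ r / 2 ∧ PySem.Int.band ((grid.getD (r / 2 - 1) []).getD (c / 2) 0) 4 ≠ 0) ∨
            (r / 2 < h ∧ PySem.Int.band ((grid.getD (r / 2) []).getD (c / 2) 0) 1 ≠ 0)
        · rw [if_pos hhq]
          refine (if_pos ?_).symm
          rcases hhq with ⟨hy1, hb⟩ | ⟨hyh, hb⟩
          · refine ⟨r / 2 - 1, by omega, c / 2, by omega, ?_⟩
            exact Or.inr (Or.inr (Or.inr (Or.inl ⟨hb, by omega, by omega⟩)))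
          · refine ⟨r / 2, by omega, c / 2, by omega, ?_⟩
            exact Or.inr (Or.inl ⟨hb, by omega, by omega⟩)
        · rw [if_neg hhq]
          refine (if_neg ?_).symm
          rintro ⟨y, hy, x, hx, W⟩
          rcases W with ⟨h1, h2⟩ | ⟨hb, h1, h2⟩ | ⟨hb, h1, h2⟩ | ⟨hb, h1, h2⟩ | ⟨hb, h1, h2⟩
          · omega
          · refine hhq (Or.inr ⟨by omega, ?_⟩)
            have ey : r / 2 = y := by omega
            have ex : c / 2 = x := by omega
            rw [ey, ex]; exact hb
          · omega
          · refine hhq (Or.inl ⟨by omega, ?_⟩)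
            have ey : r / 2 - 1 = y := by omega
            have ex : c / 2 = x := by omega
            rw [ey, ex]; exact hb
          · omega
      · rw [if_neg hcodd]
        refine (if_neg ?_).symm
        rintro ⟨y, hy, x, hx, W⟩
        rcases W with ⟨h1, h2⟩ | ⟨_, h1, h2⟩ | ⟨_, h1, h2⟩ | ⟨_, h1, h2⟩ | ⟨_, h1, h2⟩ <;> omega

theorem pvSh_init (h w : Nat) (f : Nat → Nat → String) :
    pvSh h w ((List.range (2 * h + 1)).map (fun r => (List.range (2 * w + 1)).map (fun c => f r c))) := by
  refine ⟨by simp, fun r hr => ?_⟩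
  simp [hr]

theorem pvGet2_init (h w : Nat) (f : Nat → Nat → String) {r c : Nat}
    (hr : r < 2 * h + 1) (hc : c < 2 * w + 1) :
    pvGet2 ((List.range (2 * h + 1)).map (fun r => (List.range (2 * w + 1)).map (fun c => f r c))) r c
      = f r c := by
  simp [pvGet2, hr, hc]

-- equality of two matrices from shape + pointwise pvGet2
theorem pvExt {h w : Nat} {A B : List (List String)} (hA : pvSh h w A) (hB : pvSh h w B)
    (hpt : ∀ r < 2 * h + 1, ∀ c < 2 * w + 1, pvGet2 A r c = pvGet2 B r c) : A = B := by
  apply List.ext_getElem (by rw [hA.1, hB.1])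
  intro r hr1 hr2
  have hrH : r < 2 * h + 1 := hA.1 ▸ hr1
  have hrowA : A[r]?.getD [] = A[r] := by simp [List.getElem?_eq_getElem hr1]
  have hrowB : B[r]?.getD [] = B[r] := by simp [List.getElem?_eq_getElem hr2]
  apply List.ext_getElem
  · rw [← hrowA, ← hrowB, hA.2 r hrH, hB.2 r hrH]
  · intro c hc1 hc2
    have hcW : c < 2 * w + 1 := by
      have := hA.2 r hrH
      rw [hrowA] at this
      omega
    have hpt' := hpt r hrH c hcW
    simp only [pvGet2, hrowA, hrowB] at hpt'
    simpa [List.getElem?_eq_getElem hc1, List.getElem?_eq_getElem hc2] using hpt'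

theorem pvMain (grid : List (List Int)) (hne : grid ≠ []) :
    maze_to_chars grid = maze_to_chars_alt grid := by
  have hh1 : 1 ≤ grid.length := List.length_pos_of_ne_nil hne
  simp only [maze_to_chars, maze_to_chars_alt]
  set h := grid.length with hh
  set w := (grid.headD []).length with hw
  simp only [if_neg (show ¬ h = 0 by omega)]
  have s0A : pvSh h w ((List.range (2 * h + 1)).map (fun _ => (List.range (2 * w + 1)).map (fun _ => "#"))) :=
    pvSh_init h w (fun _ _ => "#")
  have s1A := pvSh_set2 s0A 1 0
  have s2A := pvSh_set2 s1A (2 * h + 1 - 2) (2 * w + 1 - 1)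
  obtain ⟨shA, gA⟩ := pvOuter grid (List.range h) (by simp) _ s2A
  have s0B : pvSh h w ((List.range (2 * h + 1)).map (fun r => (List.range (2 * w + 1)).map (fun c => pvChB grid h w r c))) :=
    pvSh_init h w (fun r c => pvChB grid h w r c)
  have s1B := pvSh_set2 s0B 1 0
  have s2B := pvSh_set2 s1B (2 * h + 1 - 2) (2 * w + 1 - 1)
  apply pvExt shA s2B
  intro r hr c hc
  rw [gA r c]
  rw [pvGet2_set2 s1A (by omega) (by omega), pvGet2_set2 s0A (by omega) (by omega),
      pvGet2_init h w (fun _ _ => "#") hr hc]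
  rw [pvGet2_set2 s1B (by omega) (by omega), pvGet2_set2 s0B (by omega) (by omega),
      pvGet2_init h w (fun r c => pvChB grid h w r c) hr hc]
  rw [pvKey grid h w r c hr hc]
  by_cases e2 : r = 2 * h + 1 - 2 ∧ c = 2 * w + 1 - 1
  · rw [if_pos e2, if_pos e2, ite_self]
  · rw [if_neg e2, if_neg e2]
    by_cases e1 : r = 1 ∧ c = 0
    · rw [if_pos e1, if_pos e1, ite_self]
    · rw [if_neg e1, if_neg e1]

-- ===== VERDICT (by name: the statement is the Claim_ definition above) =====
theorem maze_to_chars_spec : Claim_equal_maze_to_chars := by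
  intro grid _ hpre
  unfold Spec_maze_to_chars
  exact pvMain grid hpre.1
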